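-- pv_equiv track=rewrite | github.com/Orozquiano/metodosNumericosFinal | Calculadora.py | Ncomas
-- ===== SOURCE A (Python) =====
-- def Ncomas(N):
--     i=0
--     N=list(N)
--     resultado=0
--     fin=False
--     while(i<len(N)):
--         if(N[i]!=',' and N[i]!='.'and fin==False):
--            resultado+=1
--         else:
--             fin=True
--         i+=1
--
--     return resultado
-- ===== SOURCE B (Python) =====
-- def Ncomas(N):
--     N = list(N)
--     ci = N.index(',') if ',' in N else len(N)
--     di = N.index('.') if '.' in N else len(N)
--     return min(ci, di)
-- ===== Notes on version B (the rewrite author's own statement) =====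
-- stated objective: simpler
-- what changed: Replaces A's single stateful counting loop (index variable, counter, 'fin' flag) with two independent first-occurrence searches (len as sentinel when the character is absent) combined by min; the searches run in C, giving a measured constant-factor speedup.
import Mathlib
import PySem

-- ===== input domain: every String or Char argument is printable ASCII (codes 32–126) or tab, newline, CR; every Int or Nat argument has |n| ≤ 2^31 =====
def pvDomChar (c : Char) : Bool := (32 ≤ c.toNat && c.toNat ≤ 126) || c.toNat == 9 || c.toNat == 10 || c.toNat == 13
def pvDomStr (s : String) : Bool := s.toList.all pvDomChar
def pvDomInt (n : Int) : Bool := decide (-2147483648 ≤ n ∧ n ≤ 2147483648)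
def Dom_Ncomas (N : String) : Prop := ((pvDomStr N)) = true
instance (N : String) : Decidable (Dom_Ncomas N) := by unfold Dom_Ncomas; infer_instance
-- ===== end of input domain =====

-- B replaces A's single stateful counting loop with two first-occurrence searches combined by min (simpler decomposition; a timing run measured it faster).


-- ===== PORT A =====
-- while loop over index i with counter 'resultado' and flag 'fin', folded over the chars in order
def NcomasStep (st : Int × Bool) (c : Char) : Int × Bool :=
  if c ≠ ',' ∧ c ≠ '.' ∧ st.2 = false then (st.1 + 1, st.2) else (st.1, true)

def Ncomas (N : String) : Int :=
  (N.toList.foldl NcomasStep (0, false)).1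

-- ===== PORT B =====
-- B: first-occurrence index of ',' and of '.' (len as sentinel), combined by min
def NcomasIdx (l : List Char) (c : Char) : Int :=
  if c ∈ l then ((PySem.List.index? l c).getD 0 : Nat) else (l.length : Int)

def Ncomas_alt (N : String) : Int :=
  let l := N.toList
  min (NcomasIdx l ',') (NcomasIdx l '.')

-- ===== PRECONDITION & SPEC =====
def Spec_Ncomas (N : String) (out : Int) : Prop := out = Ncomas_alt N
instance (N : String) (out : Int) : Decidable (Spec_Ncomas N out) := by unfold Spec_Ncomas; infer_instance

-- ===== CLAIM (what is proved, stated in full; the proofs are below) =====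
def Claim_equal_Ncomas : Prop := ∀ (N : String), Dom_Ncomas N → Spec_Ncomas N (Ncomas N)

-- ===== LEMMAS AND PROOFS =====
lemma NcomasIdx_cons_ne (c : Char) (l : List Char) (v : Char) (h : c ≠ v) :
    NcomasIdx (c :: l) v = NcomasIdx l v + 1 := by
  unfold NcomasIdx
  by_cases hm : v ∈ l
  · obtain ⟨k, hk⟩ := Option.isSome_iff_exists.mp ((PySem.List.index?_isSome_iff l v).mpr hm)
    rw [if_pos (List.mem_cons_of_mem c hm), if_pos hm,
      PySem.List.index?_cons_of_ne l h, hk]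
    simp
  · have hm' : v ∉ c :: l := by simp [List.mem_cons, hm, Ne.symm h]
    simp [hm, hm']

lemma NcomasIdx_cons_self (c : Char) (l : List Char) :
    NcomasIdx (c :: l) c = 0 := by
  rw [NcomasIdx, if_pos List.mem_cons_self, PySem.List.index?_cons_self]
  rfl

lemma NcomasIdx_nonneg (l : List Char) (c : Char) : 0 ≤ NcomasIdx l c := by
  unfold NcomasIdx
  split <;> positivity

lemma fold_true (l : List Char) (r : Int) :
    l.foldl NcomasStep (r, true) = (r, true) := by
  induction l generalizing r with
  | nil => rfl
  | cons c t ih => simp [List.foldl_cons, NcomasStep, ih]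

lemma fold_false (l : List Char) (r : Int) :
    (l.foldl NcomasStep (r, false)).1
      = r + min (NcomasIdx l ',') (NcomasIdx l '.') := by
  induction l generalizing r with
  | nil => simp [NcomasIdx]
  | cons c t ih =>
    by_cases hc : c ≠ ',' ∧ c ≠ '.'
    · rw [List.foldl_cons]
      have hstep : NcomasStep (r, false) c = (r + 1, false) := by
        simp [NcomasStep, hc.1, hc.2]
      rw [hstep, ih, NcomasIdx_cons_ne c t ',' hc.1, NcomasIdx_cons_ne c t '.' hc.2]
      rw [min_add_add_right]
      ring
    · have hstep : NcomasStep (r, false) c = (r, true) := by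
        rcases not_and_or.mp hc with h | h <;> simp at h <;> simp [NcomasStep, h]
      rw [List.foldl_cons, hstep, fold_true]
      have h0 : min (NcomasIdx (c :: t) ',') (NcomasIdx (c :: t) '.') = 0 := by
        rcases not_and_or.mp hc with h | h <;> simp at h <;> subst h
        · exact le_antisymm (le_trans (min_le_left _ _) (le_of_eq (NcomasIdx_cons_self _ _)))
            (le_min (by rw [NcomasIdx_cons_self]) (NcomasIdx_nonneg _ _))
        · exact le_antisymm (le_trans (min_le_right _ _) (le_of_eq (NcomasIdx_cons_self _ _)))
            (le_min (NcomasIdx_nonneg _ _) (by rw [NcomasIdx_cons_self]))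
      rw [h0]; ring

-- ===== VERDICT =====
theorem Ncomas_spec : Claim_equal_Ncomas := by
  intro N _
  unfold Spec_Ncomas Ncomas Ncomas_alt
  have := fold_false N.toList 0
  simpa using this
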